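-- pv_equiv track=rewrite | github.com/AyushCodez/MIPS_Simulator | processor_pipelined.py | generateInstructions
-- ===== SOURCE A (Python) =====
-- def generateInstructions(machineCode, startMemory = "0x400000"):
--     instructions = dict()
--     insts = machineCode.split("\n")
--     for i in range(len(insts)-1):
--         instructions[startMemory] = insts[i]
--         temp = int(startMemory, 16)
--         temp += 4
--         startMemory = hex(temp)
--     return instructions
-- ===== SOURCE B (Python) =====
-- def generateInstructions(machineCode, startMemory="0x400000"):
--     # Single streaming pass over the characters: no split(), no index loop.
--     # An entry is emitted each time a newline is seen, so the trailing segment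
--     # after the last newline is never emitted (matching A's range(len-1)).
--     instructions = {}
--     addr = startMemory
--     line = ""
--     for ch in machineCode:
--         if ch == "\n":
--             instructions[addr] = line
--             addr = hex(int(addr, 16) + 4)
--             line = ""
--         else:
--             line += ch
--     return instructions
-- ===== Notes on version B (the rewrite author's own statement) =====
-- stated objective: alternative
-- what changed: B replaces A's split-then-indexed-loop (split('\n'), range(len-1), insts[i]) by a single streaming scan over the characters of machineCode that accumulates the current line and emits one dict entry at each newline, so the line list and the index loop disappear; the trailing segment is dropped naturally because no newline follows it.
import Mathlib
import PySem

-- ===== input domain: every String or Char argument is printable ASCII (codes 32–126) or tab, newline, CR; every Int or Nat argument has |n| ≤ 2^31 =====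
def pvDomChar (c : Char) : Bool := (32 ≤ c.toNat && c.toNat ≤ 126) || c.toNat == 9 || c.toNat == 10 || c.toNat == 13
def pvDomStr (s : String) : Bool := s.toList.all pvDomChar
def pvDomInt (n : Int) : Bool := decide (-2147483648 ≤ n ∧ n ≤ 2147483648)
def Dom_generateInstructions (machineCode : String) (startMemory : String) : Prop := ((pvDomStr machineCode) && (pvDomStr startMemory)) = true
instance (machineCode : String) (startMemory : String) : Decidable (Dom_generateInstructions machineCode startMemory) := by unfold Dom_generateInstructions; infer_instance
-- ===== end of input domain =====

-- B replaces A's split-then-indexed-loop by a single streaming scan over the characters,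
-- emitting one dict entry at each newline; equivalence of the RETURN value is proved on all
-- inputs where A returns.

-- shared helper: Python's hex(n) (lowercase, "0x" prefix, "-0x…" for negatives, "0x0" for 0);
-- PySem has no hex formatter, so it is ported by hand here — exact on every Int.
def pyHexDigits (n : Nat) : List Char :=
  if h : n = 0 then [] else pyHexDigits (n / 16) ++ [Nat.digitChar (n % 16)]
decreasing_by exact Nat.div_lt_self (Nat.pos_of_ne_zero h) (by omega)

def pyHex (n : Int) : String :=
  if n < 0 then String.ofList ('-' :: '0' :: 'x' :: pyHexDigits n.natAbs)
  else if n = 0 then "0x0"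
  else String.ofList ('0' :: 'x' :: pyHexDigits n.natAbs)

-- ===== PORT A =====
-- literal transliteration of A: split, then for i in range(len(insts)-1): insert at the current
-- address string, reparse it with int(·, 16), add 4, reformat with hex().  "\n" ≠ "" so
-- split? is always `some` (the .getD [] is never the fallback); (… ).getD 0 totalizes the
-- int(startMemory, 16) call that raises in Python exactly on the inputs Pre_ excludes.
def generateInstructions (machineCode : String) (startMemory : String) : List (String × String) :=
  let insts := (PySem.Str.split? machineCode "\n").getD []
  ((PySem.List.pyRange 0 ((insts.length : Int) - 1) 1).foldl
    (fun (st : PySem.Dict String String × String) i =>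
      let instructions := st.1.insert st.2 (PySem.List.pyGetD insts i "")
      let temp := (PySem.Int.ofStrBase? st.2 16).getD 0
      (instructions, pyHex (temp + 4)))
    (PySem.Dict.empty, startMemory)).1.items

-- ===== PORT B =====
-- transliteration of Source B: one fold over the characters with state
-- (instructions, addr, line); on '\n' emit (addr, line) and step the address,
-- otherwise line += ch.  Same totalization of int(addr, 16) as in port A.
def generateInstructions_alt (machineCode : String) (startMemory : String) : List (String × String) :=
  ((machineCode.toList.foldl
    (fun (st : PySem.Dict String String × String × List Char) ch =>
      if ch = '\n' then
        (st.1.insert st.2.1 (String.ofList st.2.2),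
         pyHex ((PySem.Int.ofStrBase? st.2.1 16).getD 0 + 4), [])
      else (st.1, st.2.1, st.2.2 ++ [ch]))
    (PySem.Dict.empty, startMemory, [])).1).items

-- ===== PRECONDITION & SPEC =====
-- Pre_ excludes exactly the inputs where Python A raises: the loop runs (machineCode contains
-- a newline, i.e. the split has ≥ 2 pieces) but int(startMemory, 16) raises ValueError.
def Pre_generateInstructions (machineCode : String) (startMemory : String) : Prop :=
  ((PySem.Str.split? machineCode "\n").getD []).length ≤ 1 ∨
    (PySem.Int.ofStrBase? startMemory 16).isSome = true
instance (machineCode : String) (startMemory : String) : Decidable (Pre_generateInstructions machineCode startMemory) := by unfold Pre_generateInstructions; infer_instance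

def pvWitness_generateInstructions : String × String := ("addi $t0, $t1, 4\nsub $t2, $t0, $t1\n", "0x400000")

def Spec_generateInstructions (machineCode : String) (startMemory : String) (out : List (String × String)) : Prop := out = generateInstructions_alt machineCode startMemory
instance (machineCode : String) (startMemory : String) (out : List (String × String)) : Decidable (Spec_generateInstructions machineCode startMemory out) := by unfold Spec_generateInstructions; infer_instance

-- ===== CLAIM (what is proved, stated in full; the proofs are below) =====
def Claim_equal_generateInstructions : Prop := ∀ (machineCode : String) (startMemory : String), Dom_generateInstructions machineCode startMemory → Pre_generateInstructions machineCode startMemory → Spec_generateInstructions machineCode startMemory (generateInstructions machineCode startMemory)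

-- ===== LEMMAS AND PROOFS =====

-- the address chain both programs step through: sm, hex(int(sm,16)+4), …
def addrChain (k : Nat) (sm : String) : List String :=
  match k with
  | 0 => []
  | Nat.succ k' => sm :: addrChain k' (pyHex ((PySem.Int.ofStrBase? sm 16).getD 0 + 4))

-- split on a single newline, structurally: (piece before the first '\n', remaining pieces)
def splitNl (l : List Char) : List Char × List (List Char) :=
  match l with
  | [] => ([], [])
  | c :: r => if c = '\n' then ([], (splitNl r).1 :: (splitNl r).2)
              else (c :: (splitNl r).1, (splitNl r).2)

-- the pieces B's scan emits: every segment that IS followed by a '\n', the first one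
-- prefixed by the pending accumulator
def emits (l : List Char) (cur : List Char) : List (List Char) :=
  match l with
  | [] => []
  | c :: r => if c = '\n' then cur :: emits r [] else emits r (cur ++ [c])

theorem go_newline (l : List Char) : ∀ (fuel : Nat) (cur : List Char) (acc : List (List Char)),
    l.length < fuel →
    PySem.Chars.splitOn.go ['\n'] fuel l cur acc
      = acc.reverse ++ ((cur.reverse ++ (splitNl l).1) :: (splitNl l).2) := by
  induction l with
  | nil =>
    intro fuel cur acc h
    match fuel, h with
    | Nat.succ f, _ => simp [PySem.Chars.splitOn.go, splitNl]
  | cons c r ih =>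
    intro fuel cur acc h
    match fuel, h with
    | Nat.succ f, h =>
      by_cases hc : c = '\n'
      · subst hc
        have hpre : ['\n'].isPrefixOf ('\n' :: r) = true := by simp [List.isPrefixOf]
        rw [show PySem.Chars.splitOn.go ['\n'] (Nat.succ f) ('\n' :: r) cur acc
              = PySem.Chars.splitOn.go ['\n'] f (List.drop 1 ('\n' :: r)) [] (cur.reverse :: acc) by
            simp [PySem.Chars.splitOn.go, hpre]]
        rw [List.drop_one, List.tail_cons,
          ih f [] (cur.reverse :: acc) (by simpa using Nat.lt_of_succ_lt_succ h)]
        simp [splitNl]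
      · have hpre : ['\n'].isPrefixOf (c :: r) = false := by
          simp [List.isPrefixOf]; exact fun h' => hc h'.symm
        rw [show PySem.Chars.splitOn.go ['\n'] (Nat.succ f) (c :: r) cur acc
              = PySem.Chars.splitOn.go ['\n'] f r (c :: cur) acc by
            simp [PySem.Chars.splitOn.go, hpre]]
        rw [ih f (c :: cur) acc (by simpa using Nat.lt_of_succ_lt_succ h)]
        simp [splitNl, hc]

theorem splitOn_newline (l : List Char) :
    PySem.Chars.splitOn l ['\n'] = (splitNl l).1 :: (splitNl l).2 := by
  unfold PySem.Chars.splitOn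
  rw [go_newline l (l.length + 1) [] [] (by omega)]
  simp

-- B's streamed pieces are exactly all but the last split piece
theorem emits_eq_dropLast (l cur : List Char) :
    emits l cur = ((cur ++ (splitNl l).1) :: (splitNl l).2).dropLast := by
  induction l generalizing cur with
  | nil => simp [emits, splitNl]
  | cons c r ih =>
    by_cases hc : c = '\n'
    · subst hc
      simp only [emits, splitNl]
      rw [ih []]
      simp
    · simp only [emits, splitNl, if_neg hc]
      rw [ih (cur ++ [c])]
      simp

-- B's fold, in terms of the emitted pieces and the address chain
theorem foldB_eq (l : List Char) (d : PySem.Dict String String) (sm : String) (cur : List Char) :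
    (l.foldl
      (fun (st : PySem.Dict String String × String × List Char) ch =>
        if ch = '\n' then
          (st.1.insert st.2.1 (String.ofList st.2.2),
           pyHex ((PySem.Int.ofStrBase? st.2.1 16).getD 0 + 4), [])
        else (st.1, st.2.1, st.2.2 ++ [ch]))
      (d, sm, cur)).1
    = d.update ((addrChain (emits l cur).length sm).zip ((emits l cur).map String.ofList)) := by
  induction l generalizing d sm cur with
  | nil => simp [emits, addrChain, PySem.Dict.update]
  | cons c r ih =>
    by_cases hc : c = '\n'
    · subst hc
      simp only [List.foldl_cons, emits]
      rw [ih]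
      simp [addrChain, PySem.Dict.update]
    · simp only [List.foldl_cons, emits, if_neg hc]
      exact ih d sm (cur ++ [c])

-- A's fused loop, applied to the list of processed lines, equals "insert all (address, line)
-- pairs" — the address chain is computed identically on both sides.
theorem foldA_eq_update (lines : List String) (d : PySem.Dict String String) (sm : String) :
    (lines.foldl
      (fun (st : PySem.Dict String String × String) line =>
        (st.1.insert st.2 line,
          pyHex ((PySem.Int.ofStrBase? st.2 16).getD 0 + 4)))
      (d, sm)).1
    = d.update ((addrChain lines.length sm).zip lines) := by
  induction lines generalizing d sm with
  | nil => simp [addrChain, PySem.Dict.update]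
  | cons line rest ih =>
    simp only [List.foldl_cons, List.length_cons, addrChain, List.zip_cons_cons,
      PySem.Dict.update, List.foldl_cons]
    exact ih _ _

-- A's index loop over range(len(insts)-1) is the same fold over the first len-1 lines.
theorem foldA_range_eq (insts : List String) (init : PySem.Dict String String × String) :
    (PySem.List.pyRange 0 ((insts.length : Int) - 1) 1).foldl
      (fun (st : PySem.Dict String String × String) i =>
        (st.1.insert st.2 (PySem.List.pyGetD insts i ""),
          pyHex ((PySem.Int.ofStrBase? st.2 16).getD 0 + 4)))
      init
    = (insts.take (insts.length - 1)).foldl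
      (fun (st : PySem.Dict String String × String) line =>
        (st.1.insert st.2 line,
          pyHex ((PySem.Int.ofStrBase? st.2 16).getD 0 + 4)))
      init := by
  rcases Nat.eq_zero_or_pos insts.length with hn | hn
  · rw [List.length_eq_zero_iff.mp hn]
    simp
  · have hlen : ((insts.take (insts.length - 1)).length : Int) = (insts.length : Int) - 1 := by
      simp only [List.length_take]
      omega
    rw [← PySem.List.foldl_pyRange_zero_pyGetD' (insts.take (insts.length - 1)) ""
        (fun (st : PySem.Dict String String × String) line =>
          (st.1.insert st.2 line,
            pyHex ((PySem.Int.ofStrBase? st.2 16).getD 0 + 4)))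
        init, hlen]
    apply PySem.List.foldl_congr_mem
    intro acc i hi
    have hmem := PySem.List.mem_pyRange_one.mp hi
    have h0 : 0 ≤ i := hmem.1
    have hval : PySem.List.pyGetD insts i "" = PySem.List.pyGetD (insts.take (insts.length - 1)) i "" := by
      rw [PySem.List.pyGetD_of_nonneg _ _ h0, PySem.List.pyGetD_of_nonneg _ _ h0]
      have hlt' : i.toNat < insts.length - 1 := by
        have := hmem.2; omega
      rw [List.getD_eq_getElem?_getD, List.getD_eq_getElem?_getD, List.getElem?_take_of_lt hlt']
    rw [hval]

-- ===== VERDICT (by name: the statement is the Claim_ definition above) =====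
theorem generateInstructions_spec : Claim_equal_generateInstructions := by
  intro machineCode startMemory _ _
  unfold Spec_generateInstructions generateInstructions generateInstructions_alt
  dsimp only
  rw [foldA_range_eq, foldA_eq_update, foldB_eq]
  have hsplit : (PySem.Str.split? machineCode "\n").getD []
      = (PySem.Chars.splitOn machineCode.toList ['\n']).map String.ofList := by
    simp [PySem.Str.split?, PySem.Chars.split?]
  rw [hsplit, splitOn_newline, emits_eq_dropLast]
  simp only [List.nil_append]
  set P := (splitNl machineCode.toList).1 :: (splitNl machineCode.toList).2 with hP
  have key : P.dropLast.map String.ofList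
      = (P.map String.ofList).take ((P.map String.ofList).length - 1) := by
    rw [List.dropLast_eq_take, List.map_take]
    simp
  rw [key]
  have hlen : (List.take ((List.map String.ofList P).length - 1)
      (List.map String.ofList P)).length = P.dropLast.length := by
    simp
  rw [hlen]
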